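-- pv_equiv track=rewrite | github.com/sanvik027/PythonCode | Coding_rounds/substrings.py | find_all_substring
-- ===== SOURCE A (Python) =====
-- def find_all_substring(s):
--     sub_string=[]
--     for i in range(len(s)):
--         for j in range(i,len(s)+1):
--             substring = s[i:j]
--             if ' 'not in substring:
--                 sub_string.append(substring)
--     return sub_string
-- ===== SOURCE B (Python) =====
-- def find_all_substring(s):
--     # per start index: stop at the first space and extend the substring incrementally
--     res = []
--     n = len(s)
--     for i in range(n):
--         res.append('')
--         acc = ''
--         for c in s[i:]:
--             if c == ' ':
--                 break
--             acc += c
--             res.append(acc)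
--     return res
-- ===== Notes on version B (the rewrite author's own statement) =====
-- stated objective: alternative
-- what changed: B stops each start-index scan at the first space and extends the substring incrementally, instead of materialising and rescanning every slice s[i:j]; same total cost when the output itself is large.
import Mathlib
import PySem

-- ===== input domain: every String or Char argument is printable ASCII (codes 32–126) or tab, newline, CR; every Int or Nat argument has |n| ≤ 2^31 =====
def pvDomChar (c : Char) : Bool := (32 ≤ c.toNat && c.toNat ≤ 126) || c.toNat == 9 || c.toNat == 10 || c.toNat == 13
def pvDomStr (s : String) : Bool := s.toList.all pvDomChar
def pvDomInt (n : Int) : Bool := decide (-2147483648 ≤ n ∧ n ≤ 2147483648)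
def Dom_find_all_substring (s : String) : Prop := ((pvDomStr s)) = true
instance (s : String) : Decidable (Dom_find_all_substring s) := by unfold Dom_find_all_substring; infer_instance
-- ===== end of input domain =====

-- B enumerates, for each start index, the space-free prefixes of the suffix directly
-- (stopping at the first space) instead of building and rescanning every slice.

-- ===== PORT A =====
def find_all_substring (s : String) : List String :=
  let n : Int := PySem.Str.len s
  (PySem.List.pyRange 0 n 1).foldl (fun sub_string i =>
    (PySem.List.pyRange i (n + 1) 1).foldl (fun sub_string j =>
      let substring := PySem.Str.slice s (some i) (some j)
      if PySem.Str.isIn " " substring then sub_string else sub_string ++ [substring])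
      sub_string) []

-- ===== PORT B =====
-- inner loop 'for c in s[i:]: if c == ' ': break; acc += c; res.append(acc)'
def pvAltInner : List Char → List Char → List String → List String
  | [], _, res => res
  | c :: cs, acc, res =>
    if c = ' ' then res
    else pvAltInner cs (acc ++ [c]) (res ++ [String.ofList (acc ++ [c])])

def find_all_substring_alt (s : String) : List String :=
  let l := s.toList
  (List.range l.length).foldl (fun res i =>
    pvAltInner (l.drop i) [] (res ++ [String.ofList []])) []

-- ===== PRECONDITION & SPEC =====
def Spec_find_all_substring (s : String) (out : List String) : Prop := out = find_all_substring_alt s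
instance (s : String) (out : List String) : Decidable (Spec_find_all_substring s out) := by unfold Spec_find_all_substring; infer_instance

-- ===== CLAIM (what is proved, stated in full; the proofs are below) =====
def Claim_equal_find_all_substring : Prop := ∀ (s : String), Dom_find_all_substring s → Spec_find_all_substring s (find_all_substring s)

-- ===== LEMMAS AND PROOFS =====

-- B's inner loop appends the nonempty space-free prefixes of t, each extended by acc.
theorem pvAltInner_spec : ∀ (t acc : List Char) (res : List String),
    pvAltInner t acc res =
      res ++ (List.range (t.takeWhile (fun c => c ≠ ' ')).length).map
        (fun k => String.ofList (acc ++ t.take (k + 1))) := by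
  intro t
  induction t with
  | nil => intro acc res; simp [pvAltInner]
  | cons c cs ih =>
    intro acc res
    by_cases hc : c = ' '
    · simp [pvAltInner, hc]
    · rw [pvAltInner, if_neg hc, ih]
      simp only [List.takeWhile_cons, hc, decide_not]
      simp [List.range_succ_eq_map, List.map_map, Function.comp, List.append_assoc]

-- ' ' occurs in t.take k iff k passes the first space of t.
theorem pvMemTake (t : List Char) (k : Nat) :
    (' ' ∈ t.take k) ↔
      (t.takeWhile (fun c => c ≠ ' ')).length < k ∧
      (t.takeWhile (fun c => c ≠ ' ')).length < t.length := by
  induction t generalizing k with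
  | nil => simp
  | cons c cs ih =>
    cases k with
    | zero => simp
    | succ k' =>
      by_cases hc : c = ' '
      · simp [hc]
      · simp [List.take_succ_cons, hc, Ne.symm hc, ih k']

-- A's inner filter over k keeps exactly k = 0 … L, L = length of the space-free prefix.
theorem pvFilterRange (t : List Char) :
    ((List.range (t.length + 1)).filter
        (fun k => !PySem.Chars.isIn [' '] (t.take k))).map (fun k => t.take k) =
      [] :: (List.range (t.takeWhile (fun c => c ≠ ' ')).length).map (fun k => t.take (k + 1)) := by
  set L := (t.takeWhile (fun c => c ≠ ' ')).length with hL
  have hLle : L ≤ t.length := by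
    simpa [hL] using (List.takeWhile_sublist (l := t) _).length_le
  have hp : ∀ k, (!PySem.Chars.isIn [' '] (t.take k)) = decide (¬ (L < k ∧ L < t.length)) := by
    intro k
    have : PySem.Chars.isIn [' '] (t.take k) = true ↔ (L < k ∧ L < t.length) := by
      rw [PySem.Chars.isIn_iff_infix, List.singleton_infix_iff]
      exact pvMemTake t k
    cases h : PySem.Chars.isIn [' '] (t.take k) <;> simp_all
  have hsplit : t.length + 1 = (L + 1) + (t.length - L) := by omega
  rw [List.filter_congr (fun k _ => hp k), hsplit, List.range_add, List.filter_append]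
  have h1 : (List.range (L + 1)).filter (fun k => decide (¬ (L < k ∧ L < t.length))) =
      List.range (L + 1) := by
    apply List.filter_eq_self.mpr
    intro k hk
    simp only [List.mem_range] at hk
    simp; omega
  have h2 : (((List.range (t.length - L)).map (fun k => L + 1 + k)).filter
      (fun k => decide (¬ (L < k ∧ L < t.length)))) = [] := by
    apply List.filter_eq_nil_iff.mpr
    intro k hk
    simp only [List.mem_map, List.mem_range] at hk
    obtain ⟨m, hm, rfl⟩ := hk
    simp; omega
  rw [h1, h2, List.append_nil, List.range_succ_eq_map, List.map_cons, List.map_map]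
  simp [Function.comp]

-- per start index: A's inner segment equals B's inner segment
theorem pvSeg (l : List Char) (i : Nat) (hi : i < l.length) :
    (((PySem.List.pyRange (i : Int) ((l.length : Int) + 1) 1).filter
        (fun j => !PySem.Chars.isIn [' '] (PySem.List.slice l (some (i : Int)) (some j)))).map
      (fun j => String.ofList (PySem.List.slice l (some (i : Int)) (some j)))) =
    String.ofList [] :: (List.range ((l.drop i).takeWhile (fun c => c ≠ ' ')).length).map
      (fun k => String.ofList ((l.drop i).take (k + 1))) := by
  set t := l.drop i with ht
  have hlen : ((l.length : Int) + 1 - i).toNat = t.length + 1 := by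
    have hlt : t.length = l.length - i := by rw [ht]; exact List.length_drop
    omega
  have hrange : PySem.List.pyRange (i : Int) ((l.length : Int) + 1) 1 =
      (List.range (t.length + 1)).map (fun k : Nat => (i : Int) + (k : Int)) := by
    rw [PySem.List.pyRange_one, hlen]
  have hslice : ∀ k : Nat, PySem.List.slice l (some (i : Int)) (some ((i : Int) + (k : Int))) = t.take k := by
    intro k; rw [PySem.List.slice_natCast_add]
  rw [hrange, List.filter_map, List.map_map]
  have hcong : ((List.range (t.length + 1)).filter
        ((fun j => !PySem.Chars.isIn [' '] (PySem.List.slice l (some (i : Int)) (some j))) ∘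
          (fun k : Nat => (i : Int) + (k : Int)))) =
      (List.range (t.length + 1)).filter (fun k => !PySem.Chars.isIn [' '] (t.take k)) := by
    apply List.filter_congr
    intro k _
    simp [Function.comp, hslice k]
  rw [hcong]
  have hmap := congrArg (List.map String.ofList) (pvFilterRange t)
  rw [List.map_map] at hmap
  rw [show ((fun j => String.ofList (PySem.List.slice l (some (i : Int)) (some j))) ∘
        (fun k : Nat => (i : Int) + (k : Int))) = (fun k : Nat => String.ofList (t.take k)) from
      funext fun k => by simp [Function.comp, hslice k]]
  simpa [List.map_map, Function.comp] using hmap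

-- ===== VERDICT (by name: the statement is the Claim_ definition above) =====
theorem find_all_substring_spec : Claim_equal_find_all_substring := by
  intro s _
  unfold Spec_find_all_substring find_all_substring find_all_substring_alt
  set l := s.toList with hl
  have hA : ∀ (acc : List String) (i : Int),
      (PySem.List.pyRange i ((PySem.Str.len s : Int) + 1) 1).foldl (fun sub_string j =>
        let substring := PySem.Str.slice s (some i) (some j)
        if PySem.Str.isIn " " substring then sub_string else sub_string ++ [substring]) acc =
      acc ++ ((PySem.List.pyRange i ((l.length : Int) + 1) 1).filter
          (fun j => !PySem.Chars.isIn [' '] (PySem.List.slice l (some i) (some j)))).map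
        (fun j => String.ofList (PySem.List.slice l (some i) (some j))) := by
    intro acc i
    have hflip : ∀ (a : List String) (j : Int),
        (let substring := PySem.Str.slice s (some i) (some j)
         if PySem.Str.isIn " " substring then a else a ++ [substring]) =
        (if (!PySem.Chars.isIn [' '] (PySem.List.slice l (some i) (some j))) = true
         then a ++ [String.ofList (PySem.List.slice l (some i) (some j))] else a) := by
      intro a j
      have h2 : PySem.Str.slice s (some i) (some j) =
          String.ofList (PySem.List.slice l (some i) (some j)) := by
        apply String.ext
        simp [hl]
      cases hb : PySem.Chars.isIn [' '] (PySem.List.slice l (some i) (some j)) <;>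
        simp [h2, hb]
    have hlen : (PySem.Str.len s : Int) = (l.length : Int) := by simp [hl]
    rw [hlen] at *
    rw [PySem.List.foldl_congr_mem (l := PySem.List.pyRange i ((l.length : Int) + 1) 1)
      (h := fun a j _ => hflip a j), PySem.List.foldl_append_if]
  rw [PySem.List.foldl_congr_mem (l := PySem.List.pyRange 0 ((PySem.Str.len s : Int)) 1)
      (h := fun acc i _ => hA acc i)]
  show _ = List.foldl (fun res i => pvAltInner (List.drop i l) [] (res ++ [String.ofList []]))
      [] (List.range l.length)
  have hB : List.foldl (fun res i => pvAltInner (List.drop i l) [] (res ++ [String.ofList []]))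
      [] (List.range l.length) =
      List.foldl (fun res i =>
        res ++ (String.ofList [] :: (List.range ((l.drop i).takeWhile (fun c => c ≠ ' ')).length).map
          (fun k => String.ofList ((l.drop i).take (k + 1))))) [] (List.range l.length) :=
    PySem.List.foldl_congr_mem _ _ _ _ (fun res i _ => by rw [pvAltInner_spec]; simp)
  rw [hB]
  rw [PySem.List.foldl_append_eq_flatMap, PySem.List.foldl_append_eq_flatMap]
  have hn : (PySem.Str.len s : Int) = (l.length : Int) := by simp [hl]
  rw [hn, show PySem.List.pyRange 0 (l.length : Int) 1 =
      (List.range l.length).map (fun k : Nat => (k : Int)) from by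
    rw [PySem.List.pyRange_one]
    simp]
  rw [List.flatMap_map]
  simp only [List.nil_append]
  rw [List.flatMap_def, List.flatMap_def]
  congr 1
  apply List.map_congr_left
  intro i hi
  exact pvSeg l i (List.mem_range.mp hi)
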